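-- pv_equiv track=rewrite | github.com/skipdividedd/project | src/data_classes.py | stupid_cycle
-- ===== SOURCE A (Python) =====
-- def stupid_cycle(values, dct, number) -> dict[str, int]: #util для семплинга
--
--     dict_filter = {}
--
--     for value in values:
--         i = 0
--         for k, v in dct.items():
--             if v == value:
--                 if i < number:
--                     dict_filter[k] = v
--                     i+=1
--
--     return dict_filter
-- ===== SOURCE B (Python) =====
-- def stupid_cycle(values, dct, number):
--     index = {}
--     for k, v in dct.items():
--         index[v] = index.get(v, []) + [k]
--     cap = max(number, 0)
--     result = {}
--     seen = set()
--     for value in values: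
--         if value not in seen:
--             seen.add(value)
--             for k in index.get(value, [])[:cap]:
--                 result[k] = value
--     return result
-- ===== Notes on version B (the rewrite author's own statement) =====
-- stated objective: faster
-- what changed: B precomputes a value->ordered-keys index over dct in one pass and processes each distinct value once, taking its first `number` keys, instead of A's full rescan of dct (with a counter reset) for every element of values.
import Mathlib
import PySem

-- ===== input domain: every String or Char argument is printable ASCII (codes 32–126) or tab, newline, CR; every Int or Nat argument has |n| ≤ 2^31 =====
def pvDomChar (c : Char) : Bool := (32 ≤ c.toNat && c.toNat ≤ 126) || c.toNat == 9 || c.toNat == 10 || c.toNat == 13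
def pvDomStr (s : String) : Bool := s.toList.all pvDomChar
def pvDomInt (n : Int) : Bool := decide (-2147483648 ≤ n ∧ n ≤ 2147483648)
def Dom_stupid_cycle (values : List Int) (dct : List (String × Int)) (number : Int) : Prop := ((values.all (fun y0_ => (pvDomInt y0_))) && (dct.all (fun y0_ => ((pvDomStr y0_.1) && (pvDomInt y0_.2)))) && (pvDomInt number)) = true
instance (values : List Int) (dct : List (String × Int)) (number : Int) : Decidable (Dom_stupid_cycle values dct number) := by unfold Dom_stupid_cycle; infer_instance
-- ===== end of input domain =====

-- B builds a value→keys index in one pass and takes the first `number` keys per distinct value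
-- (O(|dct| + |values|·number) instead of A's O(|values|·|dct|) rescans).

-- ===== PORT A =====
def stupid_cycle (values : List Int) (dct : List (String × Int)) (number : Int) : List (String × Int) :=
  (values.foldl (fun (dict_filter : PySem.Dict String Int) value =>
      (dct.foldl (fun (st : PySem.Dict String Int × Int) kv =>
          if kv.2 == value then
            if st.2 < number then (st.1.insert kv.1 kv.2, st.2 + 1) else st
          else st) (dict_filter, 0)).1)
    PySem.Dict.empty).items

-- ===== PORT B =====
def stupid_cycle_alt (values : List Int) (dct : List (String × Int)) (number : Int) : List (String × Int) :=
  let index : PySem.Dict Int (List String) :=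
    dct.foldl (fun ix kv => ix.modify kv.2 [] (fun l => l ++ [kv.1])) PySem.Dict.empty
  let cap : Int := max number 0
  (values.foldl (fun (st : PySem.Dict String Int × PySem.Set Int) value =>
      if st.2.contains value then st
      else ((PySem.List.slice (index.getD value []) none (some cap)).foldl
              (fun o k => o.insert k value) st.1,
            st.2.add value))
    (PySem.Dict.empty, PySem.Set.empty)).1.items

-- ===== PRECONDITION & SPEC =====
-- Pre_ only excludes association lists with duplicate keys: `dct` is a Python dict, whose
-- key list is distinct by construction, so no Python call to A is excluded.
def Pre_stupid_cycle (values : List Int) (dct : List (String × Int)) (number : Int) : Prop :=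
  (dct.map Prod.fst).Nodup
instance (values : List Int) (dct : List (String × Int)) (number : Int) : Decidable (Pre_stupid_cycle values dct number) := by unfold Pre_stupid_cycle; infer_instance
def pvWitness_stupid_cycle : List Int × (List (String × Int)) × Int := ([1, 2, 1], [("a", 1), ("b", 2), ("c", 1)], 1)

def Spec_stupid_cycle (values : List Int) (dct : List (String × Int)) (number : Int) (out : List (String × Int)) : Prop := out = stupid_cycle_alt values dct number
instance (values : List Int) (dct : List (String × Int)) (number : Int) (out : List (String × Int)) : Decidable (Spec_stupid_cycle values dct number out) := by unfold Spec_stupid_cycle; infer_instance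

-- ===== CLAIM (what is proved, stated in full; the proofs are below) =====
def Claim_equal_stupid_cycle : Prop := ∀ (values : List Int) (dct : List (String × Int)) (number : Int), Dom_stupid_cycle values dct number → Pre_stupid_cycle values dct number → Spec_stupid_cycle values dct number (stupid_cycle values dct number)

-- ===== LEMMAS AND PROOFS =====

-- the first `number` entries of dct carrying value v (what one pass over `values` contributes)
def pvTN (dct : List (String × Int)) (number : Int) (v : Int) : List (String × Int) :=
  (dct.filter (fun kv => kv.2 == v)).take number.toNat

-- A's inner loop with counter i collects exactly the first (number - i) matching entries
lemma pv_inner_A (dct : List (String × Int)) (number value : Int) :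
    ∀ (d : PySem.Dict String Int) (i : Int), 0 ≤ i →
    (dct.foldl (fun (st : PySem.Dict String Int × Int) kv =>
        if kv.2 == value then
          if st.2 < number then (st.1.insert kv.1 kv.2, st.2 + 1) else st
        else st) (d, i)).1
    = ((dct.filter (fun kv => kv.2 == value)).take (number - i).toNat).foldl
        (fun o kv => o.insert kv.1 kv.2) d := by
  induction dct with
  | nil => intro d i _; simp
  | cons kv rest ih =>
    intro d i hi
    by_cases hv : (kv.2 == value) = true
    · by_cases hlt : i < number
      · have hstep : (number - i).toNat = (number - (i + 1)).toNat + 1 := by omega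
        simp only [List.foldl_cons, List.filter_cons, hv, if_pos hlt, if_true, hstep,
          List.take_succ_cons, List.foldl_cons]
        exact ih (d.insert kv.1 kv.2) (i + 1) (by omega)
      · have hz : (number - i).toNat = 0 := by omega
        simp only [List.foldl_cons, List.filter_cons, hv, if_neg hlt, if_true, hz,
          List.take_zero, List.foldl_nil]
        rw [ih d i hi, hz, List.take_zero, List.foldl_nil]
    · have hv' : (kv.2 == value) = false := by simpa using hv
      simp only [List.foldl_cons, List.filter_cons, hv', Bool.false_eq_true, if_false]
      exact ih d i hi

-- B's index, looked up at v, lists the keys of all entries of dct with value v, in order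
lemma pv_index_getD (dct : List (String × Int)) (v : Int) :
    (dct.foldl (fun ix kv => ix.modify kv.2 [] (fun l => l ++ [kv.1])) PySem.Dict.empty).getD v []
    = (dct.filter (fun kv => kv.2 == v)).map Prod.fst := by
  have h := PySem.Dict.getD_foldl_modify_append
      (dct.map (fun kv => (kv.2, kv.1))) (PySem.Dict.empty (κ := Int) (ν := List String)) v
  rw [List.foldl_map] at h
  simp only [PySem.Dict.getD_empty, List.nil_append, List.filter_map, List.map_map] at h
  exact h.trans (by simp [Function.comp_def])

-- inserting a binding the dict already holds changes nothing
lemma pv_insert_id (d : PySem.Dict String Int) (k : String) (v : Int)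
    (hnd : d.keys.Nodup) (h : d.get? k = some v) : d.insert k v = d := by
  apply PySem.Dict.ext
  rw [PySem.Dict.items_insert_of_contains d v (by rw [PySem.Dict.contains_eq_isSome_get?, h]; rfl)]
  have : ∀ p ∈ d.items, (if (p.1 == k) = true then (k, v) else p) = p := by
    intro p hp
    by_cases hk : (p.1 == k) = true
    · have hk' : p.1 = k := by simpa using hk
      have := PySem.Dict.get?_of_mem_items d (k := p.1) (v := p.2) (by simpa using hp) hnd
      rw [hk', h] at this
      cases p
      simp_all
    · simp [hk]
  rw [List.map_congr_left this]; simp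

lemma pv_fold_insert_id (l : List (String × Int)) (d : PySem.Dict String Int)
    (hnd : d.keys.Nodup) (h : ∀ kv ∈ l, d.get? kv.1 = some kv.2) :
    l.foldl (fun o kv => o.insert kv.1 kv.2) d = d := by
  induction l with
  | nil => rfl
  | cons kv rest ih =>
    simp only [List.foldl_cons]
    rw [pv_insert_id d kv.1 kv.2 hnd (h kv (by simp))]
    exact ih (fun kv' h' => h kv' (by simp [h']))

-- with distinct keys, an association list determines each key's value
lemma pv_assoc_unique (dct : List (String × Int)) (hd : (dct.map Prod.fst).Nodup)
    {k : String} {w w' : Int} (h1 : (k, w) ∈ dct) (h2 : (k, w') ∈ dct) : w = w' := by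
  induction dct with
  | nil => simp at h1
  | cons kv rest ih =>
    simp only [List.map_cons, List.nodup_cons] at hd
    rcases List.mem_cons.mp h1 with h1 | h1 <;> rcases List.mem_cons.mp h2 with h2 | h2
    · exact congrArg Prod.snd (h1.trans h2.symm)
    · exact absurd (List.mem_map.mpr ⟨_, h2, by rw [← h1]⟩) hd.1
    · exact absurd (List.mem_map.mpr ⟨_, h1, by rw [← h2]⟩) hd.1
    · exact ih hd.2 h1 h2

lemma pv_mem_TN {dct : List (String × Int)} {number v : Int} {kv : String × Int}
    (h : kv ∈ pvTN dct number v) : kv ∈ dct ∧ kv.2 = v := by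
  have h' := List.mem_of_mem_take h
  exact ⟨List.mem_of_mem_filter h', by simpa using List.of_mem_filter h'⟩

-- the two loops, run from any pair of states tied by the invariant, build the same dict
lemma pv_loop_eq (dct : List (String × Int)) (number : Int)
    (hd : (dct.map Prod.fst).Nodup) :
    ∀ (values : List Int) (d : PySem.Dict String Int) (seen : PySem.Set Int),
    d.keys.Nodup →
    (∀ v ∈ seen, ∀ kv ∈ pvTN dct number v, kv ∈ d.items) →
    (∀ k ∈ d.keys, ∃ w, (k, w) ∈ dct ∧ w ∈ seen) →
    values.foldl (fun (dict_filter : PySem.Dict String Int) value =>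
        (dct.foldl (fun (st : PySem.Dict String Int × Int) kv =>
            if kv.2 == value then
              if st.2 < number then (st.1.insert kv.1 kv.2, st.2 + 1) else st
            else st) (dict_filter, 0)).1) d
    = (values.foldl (fun (st : PySem.Dict String Int × PySem.Set Int) value =>
        if st.2.contains value then st
        else (((pvTN dct number value).map Prod.fst).foldl (fun o k => o.insert k value) st.1,
              st.2.add value)) (d, seen)).1 := by
  intro values
  induction values with
  | nil => intro d seen _ _ _; rfl
  | cons value rest ih =>
    intro d seen hnd hin hkeys
    simp only [List.foldl_cons]
    rw [pv_inner_A dct number value d 0 le_rfl, sub_zero,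
      show List.take number.toNat (List.filter (fun kv => kv.2 == value) dct)
        = pvTN dct number value from rfl]
    by_cases hmem : value ∈ seen
    · rw [if_pos ((PySem.Set.contains_iff seen value).mpr hmem),
        pv_fold_insert_id (pvTN dct number value) d hnd (fun kv hkv =>
          PySem.Dict.get?_of_mem_items d (hin value hmem kv hkv) hnd)]
      exact ih d seen hnd hin hkeys
    · rw [if_neg (by simp [hmem])]
      -- B's fold over the key list is A's fold over the entry list
      have hB : ((pvTN dct number value).map Prod.fst).foldl (fun o k => o.insert k value) d
          = (pvTN dct number value).foldl (fun o kv => o.insert kv.1 kv.2) d := by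
        rw [List.foldl_map]
        exact PySem.List.foldl_congr_mem _ _ _ d
          (fun acc kv hkv => by rw [(pv_mem_TN hkv).2])
      -- freshness of the inserted keys
      have hfresh : ∀ kv ∈ pvTN dct number value, d.contains kv.1 = false := by
        intro kv hkv
        by_contra hc
        have hc' : d.contains kv.1 = true := by
          cases h : d.contains kv.1 with
          | false => exact absurd h hc
          | true => rfl
        obtain ⟨w, hw, hws⟩ := hkeys kv.1 ((PySem.Dict.contains_iff_mem_keys d kv.1).mp hc')
        obtain ⟨hmemd, hval⟩ := pv_mem_TN hkv
        have : w = value := by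
          rw [← hval]; exact pv_assoc_unique dct hd hw (by exact hmemd)
        exact hmem (this ▸ hws)
      have hknd : ((pvTN dct number value).map Prod.fst).Nodup := by
        have hsub : ((pvTN dct number value).map Prod.fst).Sublist (dct.map Prod.fst) :=
          ((List.take_sublist _ _).trans List.filter_sublist).map Prod.fst
        exact hd.sublist hsub
      have hitems : ((pvTN dct number value).foldl (fun o kv => o.insert kv.1 kv.2) d).items
          = d.items ++ pvTN dct number value := by
        rw [PySem.Dict.items_foldl_insert_fresh (pvTN dct number value) Prod.fst Prod.snd d
          hfresh hknd]
        simp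
      rw [hB]
      -- establish the invariant for the new state and recurse
      set d' := (pvTN dct number value).foldl (fun o kv => o.insert kv.1 kv.2) d with hd'
      have hnd' : d'.keys.Nodup :=
        PySem.Dict.nodup_keys_foldl_insert_key (pvTN dct number value) Prod.fst
          (fun _ kv => kv.2) d hnd
      have hkeys' : d'.keys = d.items.map Prod.fst ++ (pvTN dct number value).map Prod.fst := by
        show d'.items.map Prod.fst = _
        rw [hitems, List.map_append]
      have hin' : ∀ v ∈ seen.add value, ∀ kv ∈ pvTN dct number v, kv ∈ d'.items := by
        intro v hv kv hkv
        rw [hitems, List.mem_append]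
        rcases (PySem.Set.mem_add _ _ _).mp hv with hv | hv
        · exact Or.inl (hin v hv kv hkv)
        · exact Or.inr (hv ▸ hkv)
      have hkeys'' : ∀ k ∈ d'.keys, ∃ w, (k, w) ∈ dct ∧ w ∈ seen.add value := by
        intro k hk
        rw [hkeys', List.mem_append] at hk
        rcases hk with hk | hk
        · obtain ⟨w, hw, hws⟩ := hkeys k hk
          exact ⟨w, hw, (PySem.Set.mem_add _ _ _).mpr (Or.inl hws)⟩
        · obtain ⟨kv, hkv, hfst⟩ := List.mem_map.mp hk
          obtain ⟨hmemd, hval⟩ := pv_mem_TN hkv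
          exact ⟨kv.2, hfst ▸ hmemd, (PySem.Set.mem_add _ _ _).mpr (Or.inr hval)⟩
        -- d.keys is d.items.map Prod.fst definitionally
      exact ih d' (seen.add value) hnd' hin' hkeys''

-- rewrite B's step (index lookup + slice) into the pvTN form used by pv_loop_eq
lemma pv_B_slice (dct : List (String × Int)) (number value : Int) :
    PySem.List.slice
      ((dct.foldl (fun ix kv => ix.modify kv.2 [] (fun l => l ++ [kv.1]))
          PySem.Dict.empty).getD value []) none (some (max number 0))
    = (pvTN dct number value).map Prod.fst := by
  rw [pv_index_getD, show (max number 0) = ((number.toNat : Nat) : Int) by omega,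
    PySem.List.slice_to_natCast, pvTN, List.map_take]

-- ===== VERDICT (by name: the statement is the Claim_ definition above) =====
theorem stupid_cycle_spec : Claim_equal_stupid_cycle := by
  intro values dct number _ hpre
  unfold Spec_stupid_cycle stupid_cycle stupid_cycle_alt
  simp only [pv_B_slice]
  rw [pv_loop_eq dct number hpre values PySem.Dict.empty PySem.Set.empty
    (by simp [PySem.Dict.keys_empty]) (by intro v hv; simp [PySem.Set.empty] at hv)
    (by intro k hk; simp [PySem.Dict.keys_empty] at hk)]
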